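-- pv_equiv track=rewrite | github.com/tomate44/ImportNURBS | freecad/importNURBS/import3DM.py | get_FCKnots
-- ===== SOURCE A (Python) =====
-- def get_FCKnots(fknots):
--     "Convert Rhino knots sequence into FreeCAD knots and mults"
--     k = list(fknots)
--     mults = []
--     knots = list(set(k))
--     knots.sort()
--     for kn in knots:
--         mults.append(k.count(kn))
--     mults[0] += 1
--     mults[-1] += 1
--     return knots, mults
-- ===== SOURCE B (Python) =====
-- def get_FCKnots(fknots):
--     "Convert Rhino knots sequence into FreeCAD knots and mults"
--     knots = []
--     mults = []
--     for kn in sorted(fknots):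
--         if knots and knots[-1] == kn:
--             mults[-1] += 1
--         else:
--             knots.append(kn)
--             mults.append(1)
--     mults[0] += 1
--     mults[-1] += 1
--     return knots, mults
-- ===== Notes on version B (the rewrite author's own statement) =====
-- stated objective: faster
-- what changed: Replaces set-dedup plus a per-knot full-list .count scan with one sort followed by a single run-length pass that emits each distinct knot and its multiplicity together.
import Mathlib
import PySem

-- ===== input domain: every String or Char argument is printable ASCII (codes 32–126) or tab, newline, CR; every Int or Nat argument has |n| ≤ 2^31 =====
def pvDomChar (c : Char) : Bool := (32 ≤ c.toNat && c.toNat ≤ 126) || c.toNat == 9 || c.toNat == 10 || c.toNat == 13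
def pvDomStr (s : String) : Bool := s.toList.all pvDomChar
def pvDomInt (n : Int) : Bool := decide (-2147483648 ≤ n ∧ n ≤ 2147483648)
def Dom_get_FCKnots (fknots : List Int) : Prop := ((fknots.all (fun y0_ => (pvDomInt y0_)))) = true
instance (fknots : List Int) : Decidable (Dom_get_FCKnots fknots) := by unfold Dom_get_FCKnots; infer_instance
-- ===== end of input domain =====

-- B replaces A's set-dedup + per-knot full-list .count scans by one sort and a single
-- run-length pass that emits each distinct knot with its multiplicity (objective: faster).

-- ===== PORT A =====
def get_FCKnots (fknots : List Int) : List Int × List Int :=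
  let k := fknots
  -- knots = list(set(k)); knots.sort()
  let knots := PySem.List.sorted (PySem.Set.ofList k) (fun x => x)
  -- for kn in knots: mults.append(k.count(kn))
  let mults : List Int := knots.foldl (fun ms kn => ms ++ [(k.count kn : Int)]) []
  -- mults[0] += 1 ; mults[-1] += 1  (exact under Pre_: Python raises IndexError on [])
  let mults2 := mults.modify 0 (· + 1)
  let mults3 := mults2.modify (mults2.length - 1) (· + 1)
  (knots, mults3)

-- ===== PORT B =====
def get_FCKnots_alt (fknots : List Int) : List Int × List Int :=
  -- single run-length pass over sorted(fknots)
  let st := (PySem.List.sorted fknots (fun x => x)).foldl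
    (fun (p : List Int × List Int) kn =>
      match p.1.getLast? with
      | some v => if v = kn then (p.1, p.2.modify (p.2.length - 1) (· + 1))
                  else (p.1 ++ [kn], p.2 ++ [1])
      | none => (p.1 ++ [kn], p.2 ++ [1])) ([], [])
  -- mults[0] += 1 ; mults[-1] += 1  (exact under Pre_: Python raises IndexError on [])
  let mults2 := st.2.modify 0 (· + 1)
  let mults3 := mults2.modify (mults2.length - 1) (· + 1)
  (st.1, mults3)

-- ===== PRECONDITION & SPEC =====
-- Pre_ excludes only the empty list, on which Python A raises IndexError (mults[0] += 1).
def Pre_get_FCKnots (fknots : List Int) : Prop := fknots ≠ []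
instance (fknots : List Int) : Decidable (Pre_get_FCKnots fknots) := by unfold Pre_get_FCKnots; infer_instance
def pvWitness_get_FCKnots : List Int := [0, 0, 1]

def Spec_get_FCKnots (fknots : List Int) (out : List Int × List Int) : Prop := out = get_FCKnots_alt fknots
instance (fknots : List Int) (out : List Int × List Int) : Decidable (Spec_get_FCKnots fknots out) := by unfold Spec_get_FCKnots; infer_instance

-- ===== CLAIM (what is proved, stated in full; the proofs are below) =====
def Claim_equal_get_FCKnots : Prop := ∀ (fknots : List Int), Dom_get_FCKnots fknots → Pre_get_FCKnots fknots → Spec_get_FCKnots fknots (get_FCKnots fknots)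

-- ===== LEMMAS AND PROOFS =====

theorem pv_modify_append_last (A : List Int) (b : Int) (f : Int → Int) :
    (A ++ [b]).modify A.length f = A ++ [f b] := by
  induction A with
  | nil => rfl
  | cons a t ih => simpa using ih

theorem pv_ofList_concat (t : List Int) (x : Int) :
    PySem.Set.ofList (t ++ [x]) =
      if x ∈ t then PySem.Set.ofList t else PySem.Set.ofList t ++ [x] := by
  rw [PySem.Set.ofList_eq_foldl, List.foldl_append, ← PySem.Set.ofList_eq_foldl]
  simp [PySem.Set.add, PySem.Set.contains, PySem.Set.mem_ofList]

theorem pv_ofList_sublist (t : List Int) : (PySem.Set.ofList t).Sublist t := by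
  induction t using List.reverseRecOn with
  | nil => simp [PySem.Set.ofList_eq_foldl]
  | append_singleton t x ih =>
    rw [pv_ofList_concat]
    by_cases hx : x ∈ t
    · simp only [if_pos hx]
      exact ih.trans (List.sublist_append_left t [x])
    · simp only [if_neg hx]
      exact List.Sublist.append ih (List.Sublist.refl [x])

theorem pv_getLast?_of_ub (U : List Int) (x : Int) (h : U.Pairwise (· ≤ ·))
    (hm : x ∈ U) (hub : ∀ y ∈ U, y ≤ x) : U.getLast? = some x := by
  induction U with
  | nil => simp at hm
  | cons a t ih =>
    cases t with
    | nil =>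
      simp only [List.mem_singleton] at hm
      simp [hm]
    | cons c r =>
      rw [List.getLast?_cons_cons]
      apply ih (List.Pairwise.sublist (by simp) h)
      · rcases List.mem_cons.1 hm with h1 | h2
        · have hxc : x ≤ c := h1 ▸ (List.pairwise_cons.1 h).1 c (by simp)
          have hcx : c ≤ x := hub c (by simp)
          have : c = x := le_antisymm hcx hxc
          exact this ▸ List.mem_cons_self
        · exact h2
      · intro y hy; exact hub y (List.mem_cons_of_mem _ hy)

-- the run-length loop over a sorted list computes (distinct knots in order, their counts)
theorem pv_rle_foldl (s : List Int) (h : s.Pairwise (· ≤ ·)) :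
    s.foldl (fun (p : List Int × List Int) kn =>
      match p.1.getLast? with
      | some v => if v = kn then (p.1, p.2.modify (p.2.length - 1) (· + 1))
                  else (p.1 ++ [kn], p.2 ++ [1])
      | none => (p.1 ++ [kn], p.2 ++ [1])) ([], []) =
    (PySem.Set.ofList s, (PySem.Set.ofList s).map (fun v => (s.count v : Int))) := by
  induction s using List.reverseRecOn with
  | nil => simp [PySem.Set.ofList_eq_foldl]
  | append_singleton t x ih =>
    have hprt : t.Pairwise (· ≤ ·) := List.Pairwise.sublist (List.sublist_append_left t [x]) h
    have hub : ∀ y ∈ t, y ≤ x := by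
      intro y hy
      exact (List.pairwise_append.1 h).2.2 y hy x (by simp)
    rw [List.foldl_append, ih hprt]
    set d := PySem.Set.ofList t with hd
    have hdsub : d.Sublist t := pv_ofList_sublist t
    have hdnd : d.Nodup := PySem.Set.nodup_ofList t
    have hdpr : d.Pairwise (· ≤ ·) := hprt.sublist hdsub
    by_cases hx : x ∈ t
    · -- x extends the last run
      have hxd : x ∈ d := (PySem.Set.mem_ofList t x).2 hx
      have hdub : ∀ y ∈ d, y ≤ x := fun y hy => hub y (hdsub.mem hy)
      have hlast : d.getLast? = some x := pv_getLast?_of_ub d x hdpr hxd hdub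
      have hne : d ≠ [] := by intro h0; rw [h0] at hxd; simp at hxd
      have hdecomp : d = d.dropLast ++ [x] := by
        have := List.dropLast_append_getLast hne
        rw [List.getLast?_eq_some_getLast hne] at hlast
        rw [Option.some_inj] at hlast
        rw [hlast] at this
        exact this.symm
      have hnotmem : x ∉ d.dropLast := by
        intro hmem
        have h2 : (d.dropLast ++ [x]).Nodup := hdecomp ▸ hdnd
        exact (List.disjoint_of_nodup_append h2) hmem (by simp)
      rw [pv_ofList_concat, if_pos hx, ← hd]
      simp only [List.foldl_cons, List.foldl_nil, hlast]
      simp only [if_true]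
      congr 1
      -- modify the last count
      conv_lhs => rw [hdecomp]
      conv_rhs => rw [hdecomp]
      rw [List.map_append, List.map_append, List.map_singleton, List.map_singleton]
      have hlen : ((List.map (fun v => (t.count v : Int)) d.dropLast) ++ [(t.count x : Int)]).length - 1
          = (List.map (fun v => (t.count v : Int)) d.dropLast).length := by simp
      rw [hlen, pv_modify_append_last]
      congr 1
      · apply List.map_congr_left
        intro v hv
        have hvx : v ≠ x := fun hvx => hnotmem (hvx ▸ hv)
        simp [List.count_append, Ne.symm hvx]
      · simp [List.count_append]
    · -- x starts a new run
      have hxd : x ∉ d := fun hmem => hx ((PySem.Set.mem_ofList t x).1 hmem)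
      rw [pv_ofList_concat, if_neg hx, ← hd]
      simp only [List.foldl_cons, List.foldl_nil]
      have hbranch : (match d.getLast? with
          | some v => if v = x then (d, (List.map (fun v => (t.count v : Int)) d).modify ((List.map (fun v => (t.count v : Int)) d).length - 1) (· + 1))
                      else (d ++ [x], List.map (fun v => (t.count v : Int)) d ++ [1])
          | none => (d ++ [x], List.map (fun v => (t.count v : Int)) d ++ [1]))
          = (d ++ [x], List.map (fun v => (t.count v : Int)) d ++ [(1 : Int)]) := by
        cases hl : d.getLast? with
        | none => rfl
        | some v =>
          have hvd : v ∈ d := List.mem_of_getLast? hl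
          have hvx : v ≠ x := fun hvx => hxd (hvx ▸ hvd)
          simp [hvx]
      rw [hbranch, List.map_append, List.map_singleton]
      congr 2
      · apply List.map_congr_left
        intro v hv
        have hvx : v ≠ x := fun hvx => hxd (hvx ▸ hv)
        simp [List.count_append, Ne.symm hvx]
      · have h0 : t.count x = 0 := List.count_eq_zero.2 hx
        simp [List.count_append, h0]

-- the distinct elements of sorted(fknots), in order, are sorted(set(fknots))
theorem pv_ofList_sorted (fknots : List Int) :
    PySem.Set.ofList (PySem.List.sorted fknots (fun x => x)) =
      PySem.List.sorted (PySem.Set.ofList fknots) (fun x => x) := by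
  set s := PySem.List.sorted fknots (fun x => x) with hs
  have hperm : (PySem.Set.ofList s).Perm (PySem.Set.ofList fknots) := by
    rw [List.perm_ext_iff_of_nodup (PySem.Set.nodup_ofList s) (PySem.Set.nodup_ofList fknots)]
    intro a
    rw [PySem.Set.mem_ofList, PySem.Set.mem_ofList]
    exact (PySem.List.sorted_perm fknots (fun x => x) false).mem_iff
  have hlt : (PySem.Set.ofList s).Pairwise (· < ·) := by
    have hle : (PySem.Set.ofList s).Pairwise (· ≤ ·) :=
      (PySem.List.sorted_pairwise fknots (fun x => x)).sublist (pv_ofList_sublist s)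
    have hnd : (PySem.Set.ofList s).Nodup := PySem.Set.nodup_ofList s
    exact (hle.and hnd).imp (fun h => lt_of_le_of_ne h.1 h.2)
  exact (PySem.List.sorted_eq_of_perm_of_pairwise_lt _ _ _ hperm hlt).symm

-- ===== VERDICT (by name: the statement is the Claim_ definition above) =====
theorem get_FCKnots_spec : Claim_equal_get_FCKnots := by
  intro fknots _ _
  unfold Spec_get_FCKnots get_FCKnots get_FCKnots_alt
  have hpr : (PySem.List.sorted fknots (fun x => x)).Pairwise (· ≤ ·) :=
    PySem.List.sorted_pairwise fknots (fun x => x)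
  rw [pv_rle_foldl _ hpr, pv_ofList_sorted]
  simp only [PySem.List.foldl_append_singleton_eq_map, List.nil_append]
  have hcnt : ∀ v : Int, (PySem.List.sorted fknots (fun x => x)).count v = fknots.count v :=
    fun v => (PySem.List.sorted_perm fknots (fun x => x) false).count_eq v
  refine Prod.ext rfl ?_
  simp only [hcnt]
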